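-- pv_equiv track=rewrite | github.com/patelinadev/sync-practice | geometry_utils.py | draw_hollow_rectangle_with_diamond
-- ===== SOURCE A (Python) =====
-- def draw_hollow_rectangle_with_diamond(side_length: int):
--     result = ""
--     if (side_length + 1) // 2 == 0:
--         side_length + 1
--     rectangle_col = rectangle_row = side_length + 2
--     center_x = (rectangle_col - 1) // 2
--     center_y = (rectangle_row - 1) // 2
--     diamond_raduis = (side_length - 1) // 2
--     for i in range(rectangle_row):
--         for j in  range(rectangle_col):
--             distance = abs(i - center_y) + abs(j - center_x)
--             if distance <= diamond_raduis:
--                 result += " "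
--             else:
--                 result += "*"
--             result += "\n"
--     return result
-- ===== SOURCE B (Python) =====
-- def draw_hollow_rectangle_with_diamond(side_length: int):
--     n = side_length + 2
--     if n <= 0:
--         return ""
--     center = (n - 1) // 2
--     radius = (side_length - 1) // 2
--     out = ""
--     for i in range(n):
--         slack = radius - abs(i - center)
--         if slack < 0:
--             out += "*\n" * n
--         else:
--             lo = max(center - slack, 0)
--             hi = min(center + slack, n - 1)
--             out += "*\n" * lo + " \n" * (hi - lo + 1) + "*\n" * (n - 1 - hi)
--     return out
-- ===== Notes on version B (the rewrite author's own statement) =====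
-- stated objective: faster
-- what changed: B drops A's no-op if and replaces the per-cell inner loop (an abs-distance test and two appends for every cell) by computing, per row, the clamped space interval from the row's slack and emitting the row as three counted blocks '*\n'*lo + ' \n'*(hi-lo+1) + '*\n'*rest.
import Mathlib
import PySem

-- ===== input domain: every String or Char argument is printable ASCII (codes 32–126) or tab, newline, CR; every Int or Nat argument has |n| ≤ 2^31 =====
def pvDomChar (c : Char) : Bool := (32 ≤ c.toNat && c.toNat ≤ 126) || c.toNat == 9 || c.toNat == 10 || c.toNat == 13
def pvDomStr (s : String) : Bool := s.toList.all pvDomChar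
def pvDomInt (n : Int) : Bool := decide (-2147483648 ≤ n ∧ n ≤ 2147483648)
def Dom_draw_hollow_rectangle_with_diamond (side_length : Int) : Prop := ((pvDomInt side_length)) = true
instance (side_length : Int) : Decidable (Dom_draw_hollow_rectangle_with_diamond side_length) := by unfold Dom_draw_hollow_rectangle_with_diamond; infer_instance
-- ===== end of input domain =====

-- B replaces A's per-cell nested loop (a distance test for every cell) by building each
-- row directly from three counted blocks (stars / spaces / stars); objective: faster
-- (row-level block construction instead of a per-cell distance scan).

-- ===== PORT A =====
-- literal transliteration of A; the Python `if (side_length+1)//2 == 0: side_length + 1`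
-- is an expression statement with no effect, so it contributes nothing here.
def draw_hollow_rectangle_with_diamond (side_length : Int) : String :=
  let rectangle_col := side_length + 2
  let rectangle_row := side_length + 2
  let center_x := PySem.Int.floordiv (rectangle_col - 1) 2
  let center_y := PySem.Int.floordiv (rectangle_row - 1) 2
  let diamond_raduis := PySem.Int.floordiv (side_length - 1) 2
  (PySem.List.pyRange 0 rectangle_row 1).foldl (fun result i =>
    (PySem.List.pyRange 0 rectangle_col 1).foldl (fun result j =>
      (result ++ (if |i - center_y| + |j - center_x| ≤ diamond_raduis then " " else "*")) ++ "\n")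
      result) ""

-- ===== PORT B =====
-- `s * k` (Python string repetition; empty for k ≤ 0)
def pvRep (s : String) (k : Nat) : String :=
  match k with
  | 0 => ""
  | k + 1 => s ++ pvRep s k

def draw_hollow_rectangle_with_diamond_alt (side_length : Int) : String :=
  let n := side_length + 2
  if n ≤ 0 then ""
  else
    let center := PySem.Int.floordiv (n - 1) 2
    let radius := PySem.Int.floordiv (side_length - 1) 2
    (PySem.List.pyRange 0 n 1).foldl (fun out i =>
      let slack := radius - |i - center|
      if slack < 0 then out ++ pvRep "*\n" n.toNat
      else
        let lo := max (center - slack) 0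
        let hi := min (center + slack) (n - 1)
        out ++ (pvRep "*\n" lo.toNat ++ pvRep " \n" (hi - lo + 1).toNat ++ pvRep "*\n" (n - 1 - hi).toNat)) ""

-- ===== PRECONDITION & SPEC =====
def Spec_draw_hollow_rectangle_with_diamond (side_length : Int) (out : String) : Prop := out = draw_hollow_rectangle_with_diamond_alt side_length
instance (side_length : Int) (out : String) : Decidable (Spec_draw_hollow_rectangle_with_diamond side_length out) := by unfold Spec_draw_hollow_rectangle_with_diamond; infer_instance

-- ===== CLAIM (what is proved, stated in full; the proofs are below) =====
def Claim_equal_draw_hollow_rectangle_with_diamond : Prop := ∀ (side_length : Int), Dom_draw_hollow_rectangle_with_diamond side_length → Spec_draw_hollow_rectangle_with_diamond side_length (draw_hollow_rectangle_with_diamond side_length)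

-- ===== LEMMAS AND PROOFS =====

/-- Concatenation of a list of strings. -/
def strConcat (l : List String) : String := l.foldr (· ++ ·) ""

lemma strConcat_nil : strConcat [] = "" := rfl

lemma strConcat_cons (a : String) (l : List String) :
    strConcat (a :: l) = a ++ strConcat l := rfl

lemma strConcat_append (l₁ l₂ : List String) :
    strConcat (l₁ ++ l₂) = strConcat l₁ ++ strConcat l₂ := by
  induction l₁ with
  | nil => simp [strConcat_nil]
  | cons a t ih => simp [strConcat_cons, ih, String.append_assoc]

lemma strConcat_replicate (k : Nat) (s : String) :
    strConcat (List.replicate k s) = pvRep s k := by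
  induction k with
  | zero => rfl
  | succ k ih => simp [List.replicate_succ, strConcat_cons, ih, pvRep]

/-- a foldl accumulating `r ++ f x` is the concat of the mapped list. -/
lemma foldl_str (l : List Int) (f : Int → String) (s : String) :
    l.foldl (fun r x => r ++ f x) s = s ++ strConcat (l.map f) := by
  induction l generalizing s with
  | nil => simp [strConcat_nil]
  | cons a t ih => simp [List.foldl_cons, ih, strConcat_cons, String.append_assoc]

/-- A's inner loop shape: two appends per step. -/
lemma foldl_cell (l : List Int) (f : Int → String) (s : String) :
    l.foldl (fun r x => (r ++ f x) ++ "\n") s = s ++ strConcat (l.map (fun x => f x ++ "\n")) := by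
  have : (fun (r : String) x => (r ++ f x) ++ "\n") = fun r x => r ++ (f x ++ "\n") := by
    funext r x; rw [String.append_assoc]
  rw [this, foldl_str]

lemma map_range_const {α : Type} (k : Nat) (f : Nat → α) (c : α)
    (h : ∀ m, m < k → f m = c) : (List.range k).map f = List.replicate k c := by
  rw [List.eq_replicate_iff]
  constructor
  · simp
  · intro b hb
    simp only [List.mem_map, List.mem_range] at hb
    obtain ⟨m, hm, rfl⟩ := hb
    exact h m hm

/-- Row equality: the per-cell scan of row `i` produces the three-block row. -/
lemma row_eq (n c r i : Int) (hn : 0 < n) (hc0 : 0 ≤ c) (hc1 : c ≤ n - 1) :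
    (List.range n.toNat).map
        (fun (k : Nat) => (if |i - c| + |(k : Int) - c| ≤ r then " " else "*") ++ "\n")
      = (if r - |i - c| < 0 then List.replicate n.toNat "*\n"
         else
           List.replicate (max (c - (r - |i - c|)) 0).toNat "*\n" ++
           List.replicate (min (c + (r - |i - c|)) (n - 1) - max (c - (r - |i - c|)) 0 + 1).toNat " \n" ++
           List.replicate (n - 1 - min (c + (r - |i - c|)) (n - 1)).toNat "*\n") := by
  simp only [Int.abs_eq_natAbs]
  by_cases hs : r - ((i - c).natAbs : Int) < 0
  · rw [if_pos hs]
    apply map_range_const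
    intro m hm
    rw [if_neg (by omega)]
    rfl
  · rw [if_neg hs]
    set s : Int := r - ((i - c).natAbs : Int) with hsdef
    have hs0 : 0 ≤ s := by omega
    set lo : Int := max (c - s) 0 with hlo
    set hi : Int := min (c + s) (n - 1) with hhi
    have hlo0 : 0 ≤ lo := by omega
    have hlohi : lo ≤ hi := by omega
    have hhin : hi ≤ n - 1 := by omega
    have hsplit : n.toNat = lo.toNat + ((hi - lo + 1).toNat + (n - 1 - hi).toNat) := by omega
    rw [hsplit, List.range_add, List.range_add, List.append_assoc]
    simp only [List.map_append, List.map_map, Function.comp_def]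
    congr 1
    · apply map_range_const
      intro m hm
      rw [if_neg (by omega)]
      rfl
    congr 1
    · apply map_range_const
      intro m hm
      rw [if_pos (by omega)]
      rfl
    · apply map_range_const
      intro m hm
      rw [if_neg (by omega)]
      rfl

-- ===== VERDICT (by name: the statement is the Claim_ definition above) =====
theorem draw_hollow_rectangle_with_diamond_spec : Claim_equal_draw_hollow_rectangle_with_diamond := by
  intro s _
  unfold Spec_draw_hollow_rectangle_with_diamond
  unfold draw_hollow_rectangle_with_diamond draw_hollow_rectangle_with_diamond_alt
  simp only []
  set n : Int := s + 2 with hn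
  by_cases hpos : n ≤ 0
  · rw [if_pos hpos, PySem.List.pyRange_one_eq_nil (by omega)]
    rfl
  · rw [if_neg hpos]
    have hpos' : 0 < n := by omega
    have h2 : (0 : Int) < 2 := by norm_num
    rw [PySem.Int.floordiv_eq_ediv_of_pos h2, PySem.Int.floordiv_eq_ediv_of_pos h2]
    set c : Int := (n - 1) / 2 with hc
    set r : Int := (s - 1) / 2 with hr
    have hc0 : 0 ≤ c := by omega
    have hc1 : c ≤ n - 1 := by omega
    -- turn B's loop body into the `out ++ f i` shape, then both folds into concats
    have hb : (fun (out : String) (i : Int) =>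
        if r - |i - c| < 0 then out ++ pvRep "*\n" n.toNat
        else out ++ (pvRep "*\n" (max (c - (r - |i - c|)) 0).toNat ++
              pvRep " \n" (min (c + (r - |i - c|)) (n - 1) - max (c - (r - |i - c|)) 0 + 1).toNat ++
              pvRep "*\n" (n - 1 - min (c + (r - |i - c|)) (n - 1)).toNat))
        = fun (out : String) (i : Int) => out ++
            (if r - |i - c| < 0 then pvRep "*\n" n.toNat
             else pvRep "*\n" (max (c - (r - |i - c|)) 0).toNat ++
              pvRep " \n" (min (c + (r - |i - c|)) (n - 1) - max (c - (r - |i - c|)) 0 + 1).toNat ++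
              pvRep "*\n" (n - 1 - min (c + (r - |i - c|)) (n - 1)).toNat) := by
      funext out i; split_ifs <;> rfl
    rw [hb]
    simp only [foldl_cell, foldl_str]
    simp only [String.empty_append]
    congr 1
    apply List.map_congr_left
    intro i hi
    rw [PySem.List.mem_pyRange_one] at hi
    rw [PySem.List.pyRange_one]
    simp only [Int.sub_zero, List.map_map]
    have hrow := row_eq n c r i hpos' hc0 hc1
    simp only [Function.comp_def, zero_add] at hrow ⊢
    rw [hrow]
    by_cases hs : r - |i - c| < 0
    · rw [if_pos hs, if_pos hs, strConcat_replicate]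
    · rw [if_neg hs, if_neg hs, strConcat_append, strConcat_append,
          strConcat_replicate, strConcat_replicate, strConcat_replicate]
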